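-- pv_equiv track=rewrite | github.com/CarlosLunaMota/A-Puzzle-A-Day | A-Puzzle-A-Day - Find Solutions.py | orientations
-- ===== SOURCE A (Python) =====
-- def orientations(piece):
--
--     max_x = max(x for (x,y) in piece)
--     max_y = max(y for (x,y) in piece)
--     return set([tuple(sorted((      x,       y) for (x,y) in piece)),
--                 tuple(sorted((      x, max_y-y) for (x,y) in piece)),
--                 tuple(sorted((max_x-x, max_y-y) for (x,y) in piece)),
--                 tuple(sorted((max_x-x,       y) for (x,y) in piece)),
--                 tuple(sorted((      y,       x) for (x,y) in piece)),
--                 tuple(sorted((      y, max_x-x) for (x,y) in piece)),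
--                 tuple(sorted((max_y-y, max_x-x) for (x,y) in piece)),
--                 tuple(sorted((max_y-y,       x) for (x,y) in piece))])
-- ===== SOURCE B (Python) =====
-- def orientations(piece):
--     mx = max(x for (x, y) in piece)
--     my = max(y for (x, y) in piece)
--     out = set()
--     for pts, h, v in ((list(piece), mx, my),
--                       ([(y, x) for (x, y) in piece], my, mx)):
--         for flip in (None, 'v', 'h', 'v'):
--             if flip == 'v':
--                 pts = [(x, v - y) for (x, y) in pts]
--             elif flip == 'h':
--                 pts = [(h - x, y) for (x, y) in pts]
--             out.add(tuple(sorted(pts)))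
--     return out
-- ===== Notes on version B (the rewrite author's own statement) =====
-- stated objective: alternative
-- what changed: B generates the dihedral orientations by iterated composition (start from the piece and its transpose, then alternately apply a vertical and a horizontal flip, adding each normalized sorted tuple to the set) instead of A's 8 independent closed-form coordinate expressions.
import Mathlib
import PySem

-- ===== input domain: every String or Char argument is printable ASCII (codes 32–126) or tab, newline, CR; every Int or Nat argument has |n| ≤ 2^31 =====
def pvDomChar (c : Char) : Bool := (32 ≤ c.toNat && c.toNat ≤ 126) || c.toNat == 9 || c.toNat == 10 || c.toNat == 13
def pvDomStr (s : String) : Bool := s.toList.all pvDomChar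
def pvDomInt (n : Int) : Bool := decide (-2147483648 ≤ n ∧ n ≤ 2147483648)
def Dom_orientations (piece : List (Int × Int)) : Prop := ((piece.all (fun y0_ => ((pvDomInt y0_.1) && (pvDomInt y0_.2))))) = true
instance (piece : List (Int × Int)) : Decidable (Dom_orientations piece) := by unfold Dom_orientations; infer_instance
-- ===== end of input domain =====

-- B generates the 8 orientations by iterated flip composition (transpose + alternate vertical/
-- horizontal flips) instead of A's 8 independent closed-form comprehensions; objective: alternative.

-- ===== PORT A =====
-- A: computes max_x, max_y, then a set of 8 sorted tuples, each one closed-form comprehension.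
def orientations (piece : List (Int × Int)) : List (List (Int × Int)) :=
  match PySem.List.max? (piece.map (fun p => p.1)) (fun v => v),
        PySem.List.max? (piece.map (fun p => p.2)) (fun v => v) with
  | some mx, some my =>
      PySem.Set.ofList
        [ PySem.List.sorted2 (piece.map (fun p => (p.1, p.2))) Prod.fst Prod.snd,
          PySem.List.sorted2 (piece.map (fun p => (p.1, my - p.2))) Prod.fst Prod.snd,
          PySem.List.sorted2 (piece.map (fun p => (mx - p.1, my - p.2))) Prod.fst Prod.snd,
          PySem.List.sorted2 (piece.map (fun p => (mx - p.1, p.2))) Prod.fst Prod.snd,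
          PySem.List.sorted2 (piece.map (fun p => (p.2, p.1))) Prod.fst Prod.snd,
          PySem.List.sorted2 (piece.map (fun p => (p.2, mx - p.1))) Prod.fst Prod.snd,
          PySem.List.sorted2 (piece.map (fun p => (my - p.2, mx - p.1))) Prod.fst Prod.snd,
          PySem.List.sorted2 (piece.map (fun p => (my - p.2, p.1))) Prod.fst Prod.snd ]
  | _, _ => []  -- unreachable under Pre_orientations (Python: max() raises ValueError on [])

-- ===== PORT B =====
-- B's flips: [(x, v - y) …] and [(h - x, y) …]
def pvVF (c : Int) (pts : List (Int × Int)) : List (Int × Int) := pts.map (fun p => (p.1, c - p.2))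
def pvHF (c : Int) (pts : List (Int × Int)) : List (Int × Int) := pts.map (fun p => (c - p.1, p.2))
-- B's inner loop: for flip in (None,'v','h','v'): transform pts, add sorted tuple to out
-- (tags: none = None, some true = 'v', some false = 'h')
def pvAddFour (out : PySem.Set (List (Int × Int))) (pts0 : List (Int × Int)) (h v : Int) :
    PySem.Set (List (Int × Int)) :=
  (([none, some true, some false, some true] : List (Option Bool)).foldl
    (fun (st : List (Int × Int) × PySem.Set (List (Int × Int))) tag =>
      let pts := match tag with
        | none => st.1
        | some true => pvVF v st.1
        | some false => pvHF h st.1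
      (pts, PySem.Set.add st.2 (PySem.List.sorted2 pts Prod.fst Prod.snd)))
    (pts0, out)).2

def orientations_alt (piece : List (Int × Int)) : List (List (Int × Int)) :=
  match PySem.List.max? (piece.map (fun p => p.1)) (fun v => v) with
  | none => []   -- unreachable under Pre_orientations (Python: max() raises ValueError on [])
  | some mx =>
    match PySem.List.max? (piece.map (fun p => p.2)) (fun v => v) with
    | none => []
    | some my =>
        pvAddFour (pvAddFour PySem.Set.empty piece mx my)
          (piece.map (fun p => (p.2, p.1))) my mx

-- ===== PRECONDITION & SPEC =====
-- Pre_ excludes only the empty list, on which Python A raises ValueError (max() of empty sequence).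
def Pre_orientations (piece : List (Int × Int)) : Prop := piece ≠ []
instance (piece : List (Int × Int)) : Decidable (Pre_orientations piece) := by unfold Pre_orientations; infer_instance
def pvWitness_orientations : (List (Int × Int)) := [(0, 0), (1, 0), (1, 1)]

def Spec_orientations (piece : List (Int × Int)) (out : List (List (Int × Int))) : Prop := out = orientations_alt piece
instance (piece : List (Int × Int)) (out : List (List (Int × Int))) : Decidable (Spec_orientations piece out) := by unfold Spec_orientations; infer_instance

-- ===== CLAIM (what is proved, stated in full; the proofs are below) =====
def Claim_equal_orientations : Prop := ∀ (piece : List (Int × Int)), Dom_orientations piece → Pre_orientations piece → Spec_orientations piece (orientations piece)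

-- ===== LEMMAS AND PROOFS =====

-- pointwise arithmetic congruence for one map stage
theorem pv_map_eq (f g : (Int × Int) → (Int × Int)) (l : List (Int × Int))
    (h : ∀ p : Int × Int, f p = g p) : l.map f = l.map g :=
  List.map_congr_left (fun p _ => h p)

theorem pv_sorted2_congr (X Y : List (Int × Int)) (h : X = Y) :
    PySem.List.sorted2 X Prod.fst Prod.snd = PySem.List.sorted2 Y Prod.fst Prod.snd := by rw [h]

theorem pv_add_congr (s t : PySem.Set (List (Int × Int))) (x y : List (Int × Int))
    (hs : s = t) (hx : x = y) : PySem.Set.add s x = PySem.Set.add t y := by rw [hs, hx]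

-- pvAddFour unfolded once (definitional: the fold runs over the literal 4-tag list)
theorem pvAddFour_def (out : PySem.Set (List (Int × Int))) (pts0 : List (Int × Int)) (h v : Int) :
    pvAddFour out pts0 h v =
      PySem.Set.add (PySem.Set.add (PySem.Set.add (PySem.Set.add out
        (PySem.List.sorted2 pts0 Prod.fst Prod.snd))
        (PySem.List.sorted2 (pvVF v pts0) Prod.fst Prod.snd))
        (PySem.List.sorted2 (pvHF h (pvVF v pts0)) Prod.fst Prod.snd))
        (PySem.List.sorted2 (pvVF v (pvHF h (pvVF v pts0))) Prod.fst Prod.snd) := rfl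

-- Set.ofList on an 8-element literal, as the add chain it is defined to be
theorem pv_ofList8 (a1 a2 a3 a4 a5 a6 a7 a8 : List (Int × Int)) :
    PySem.Set.ofList [a1, a2, a3, a4, a5, a6, a7, a8] =
      PySem.Set.add (PySem.Set.add (PySem.Set.add (PySem.Set.add (PySem.Set.add (PySem.Set.add
        (PySem.Set.add (PySem.Set.add PySem.Set.empty a1) a2) a3) a4) a5) a6) a7) a8 := rfl

-- ===== VERDICT (by name: the statement is the Claim_ definition above) =====
theorem orientations_spec : Claim_equal_orientations := by
  intro piece _ hpre
  unfold Spec_orientations orientations orientations_alt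
  cases h1 : PySem.List.max? (piece.map (fun p => p.1)) (fun v => v) with
  | none =>
      exact absurd (List.map_eq_nil_iff.mp ((PySem.List.max?_eq_none_iff _ _).mp h1)) hpre
  | some mx =>
  cases h2 : PySem.List.max? (piece.map (fun p => p.2)) (fun v => v) with
  | none =>
      exact absurd (List.map_eq_nil_iff.mp ((PySem.List.max?_eq_none_iff _ _).mp h2)) hpre
  | some my =>
  dsimp only
  rw [pv_ofList8, pvAddFour_def, pvAddFour_def]
  refine pv_add_congr _ _ _ _ (pv_add_congr _ _ _ _ (pv_add_congr _ _ _ _ (pv_add_congr _ _ _ _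
    (pv_add_congr _ _ _ _ (pv_add_congr _ _ _ _ (pv_add_congr _ _ _ _ (pv_add_congr _ _ _ _ rfl
    ?_) ?_) ?_) ?_) ?_) ?_) ?_) ?_
  all_goals apply pv_sorted2_congr
  all_goals try simp only [pvVF, pvHF, List.map_map, Function.comp_def]
  all_goals first
    | rfl
    | exact (List.map_id piece).symm
    | exact List.map_id piece
    | (apply pv_map_eq; intro p; obtain ⟨a, b⟩ := p; simp only [Prod.mk.injEq, true_and]; omega)
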